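-- pv_equiv track=rewrite | github.com/ihategoto/Link | modbus_handler/handler.py | are_merged
-- ===== SOURCE A (Python) =====
-- def are_merged(obj):
--     addresses = [o["address"] for o in obj]
--     a_min = min(addresses)
--     a_max = max(addresses)
--     length = len(addresses)
--     if a_max-a_min+1 == length and len(set(addresses)) == length:
--         return True, a_min
--     else:
--         return False, a_min
-- ===== SOURCE B (Python) =====
-- def are_merged(obj):
--     addresses = sorted(o["address"] for o in obj)
--     a_min = addresses[0]
--     expected = a_min
--     merged = True
--     for a in addresses:
--         if a != expected:
--             merged = False
--             break
--         expected += 1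
--     return merged, a_min
-- ===== Notes on version B (the rewrite author's own statement) =====
-- stated objective: alternative
-- what changed: B sorts the addresses once, takes the head as the minimum, and walks the sorted list with an expected-next-value counter (a mismatch means a duplicate or a hole), instead of A's min/max span count plus a separate set-cardinality test.
import Mathlib
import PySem

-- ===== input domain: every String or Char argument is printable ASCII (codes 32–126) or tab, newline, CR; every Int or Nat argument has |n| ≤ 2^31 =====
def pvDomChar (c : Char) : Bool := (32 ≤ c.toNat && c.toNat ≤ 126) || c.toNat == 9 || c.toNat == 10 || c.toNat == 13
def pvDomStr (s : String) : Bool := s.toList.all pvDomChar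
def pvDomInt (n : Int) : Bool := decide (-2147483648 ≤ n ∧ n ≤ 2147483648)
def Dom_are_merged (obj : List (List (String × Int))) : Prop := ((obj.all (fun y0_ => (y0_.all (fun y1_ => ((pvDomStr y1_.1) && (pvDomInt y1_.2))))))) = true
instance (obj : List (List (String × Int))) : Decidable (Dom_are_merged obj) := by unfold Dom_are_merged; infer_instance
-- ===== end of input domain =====

-- B sorts the addresses once, takes the head as the minimum, and walks the sorted list with an
-- expected-next-value counter, instead of A's min/max span count plus a set-cardinality test.


-- ===== PORT A =====
-- o["address"]: first-match lookup in the association list; the .getD 0 is never taken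
-- under Pre_ (a missing key is a Python KeyError, excluded by Pre_).
def are_merged (obj : List (List (String × Int))) : Bool × Int :=
  let addresses : List Int := obj.map (fun o => ((PySem.Dict.mk o).get? "address").getD 0)
  let a_min : Int := (PySem.List.min? addresses (fun x => x)).getD 0  -- min([]) raises: excluded by Pre_
  let a_max : Int := (PySem.List.max? addresses (fun x => x)).getD 0
  let length : Int := PySem.List.len addresses
  if a_max - a_min + 1 == length && PySem.List.len (PySem.Set.ofList addresses) == length then
    (true, a_min)
  else
    (false, a_min)

-- ===== PORT B =====
-- the 'for a in addresses: if a != expected: merged = False; break; expected += 1' loop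
def pvChainFrom : Int → List Int → Bool
  | _, [] => true
  | e, a :: t => if a == e then pvChainFrom (e + 1) t else false

def are_merged_alt (obj : List (List (String × Int))) : Bool × Int :=
  let addresses : List Int :=
    PySem.List.sorted (obj.map (fun o => ((PySem.Dict.mk o).get? "address").getD 0)) (fun x => x) false
  let a_min : Int := (PySem.List.pyGet? addresses 0).getD 0  -- addresses[0] raises on []: excluded by Pre_
  (pvChainFrom a_min addresses, a_min)

-- ===== PRECONDITION & SPEC =====
-- Pre_ excludes exactly the inputs where Python A raises: the empty list (min of an empty
-- sequence is a ValueError) and an element without an "address" key (KeyError).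
def Pre_are_merged (obj : List (List (String × Int))) : Prop :=
  obj ≠ [] ∧ ∀ o ∈ obj, (PySem.Dict.mk o).contains "address" = true
instance (obj : List (List (String × Int))) : Decidable (Pre_are_merged obj) := by
  unfold Pre_are_merged; infer_instance

def pvWitness_are_merged : (List (List (String × Int))) := [[("address", 3)], [("address", 2)]]

def Spec_are_merged (obj : List (List (String × Int))) (out : Bool × Int) : Prop := out = are_merged_alt obj
instance (obj : List (List (String × Int))) (out : Bool × Int) : Decidable (Spec_are_merged obj out) := by unfold Spec_are_merged; infer_instance

-- ===== CLAIM (what is proved, stated in full; the proofs are below) =====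
def Claim_equal_are_merged : Prop := ∀ (obj : List (List (String × Int))), Dom_are_merged obj → Pre_are_merged obj → Spec_are_merged obj (are_merged obj)

-- ===== LEMMAS AND PROOFS =====

-- B's counter walk succeeds exactly on a run of consecutive integers starting at e.
lemma chainFrom_eq_range (xs : List Int) (e : Int) :
    pvChainFrom e xs = true ↔ xs = PySem.List.pyRange e (e + xs.length) 1 := by
  induction xs generalizing e with
  | nil =>
    simp only [List.length_nil, Nat.cast_zero, add_zero]
    simp [pvChainFrom, PySem.List.pyRange_one_eq_nil (le_refl e)]
  | cons a t ih =>
    have hcons : PySem.List.pyRange e (e + ((t.length : Int) + 1)) 1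
        = e :: PySem.List.pyRange (e + 1) (e + ((t.length : Int) + 1)) 1 :=
      PySem.List.pyRange_one_cons (by omega)
    have harg : e + ((t.length : Int) + 1) = (e + 1) + (t.length : Int) := by ring
    simp only [pvChainFrom, List.length_cons, Nat.cast_add, Nat.cast_one, hcons]
    constructor
    · intro h
      by_cases hae : a = e
      · subst hae
        simp only [beq_self_eq_true, if_true] at h
        rw [harg] at *
        exact congrArg (List.cons a) ((ih (a + 1)).mp h)
      · simp [hae] at h
    · intro h
      obtain ⟨h1, h2⟩ := List.cons_eq_cons.mp h
      subst h1
      rw [harg] at h2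
      simp [(ih (a + 1)).mpr h2]

-- A's set-cardinality test is a Nodup test.
lemma setlen_eq_iff_nodup (xs : List Int) :
    (PySem.Set.ofList xs).length = xs.length ↔ xs.Nodup := by
  constructor
  · intro h
    have h1 : (PySem.Set.ofList xs).Nodup := PySem.Set.nodup_ofList xs
    have h2 : xs.dedup.Nodup := xs.nodup_dedup
    have hmem : ∀ y, y ∈ PySem.Set.ofList xs ↔ y ∈ xs.dedup := by
      intro y; rw [PySem.Set.mem_ofList, List.mem_dedup]
    have hperm : (PySem.Set.ofList xs).Perm xs.dedup :=
      (List.perm_ext_iff_of_nodup h1 h2).mpr hmem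
    have hlen : xs.dedup.length = xs.length := by rw [← hperm.length_eq, h]
    have := (xs.dedup_sublist).eq_of_length hlen
    rw [← this]; exact h2
  · intro h; rw [PySem.Set.ofList_eq_self_of_nodup xs h]

-- core: A's test and B's walk agree on any nonempty list of addresses
lemma core (xs : List Int) (hne : xs ≠ []) :
    (if (PySem.List.max? xs (fun x => x)).getD 0 - (PySem.List.min? xs (fun x => x)).getD 0 + 1 == PySem.List.len xs
        && PySem.List.len (PySem.Set.ofList xs) == PySem.List.len xs then
      ((true : Bool), (PySem.List.min? xs (fun x => x)).getD 0)
     else ((false : Bool), (PySem.List.min? xs (fun x => x)).getD 0)) =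
    (pvChainFrom ((PySem.List.pyGet? (PySem.List.sorted xs (fun x => x) false) 0).getD 0)
        (PySem.List.sorted xs (fun x => x) false),
     (PySem.List.pyGet? (PySem.List.sorted xs (fun x => x) false) 0).getD 0) := by
  set s := PySem.List.sorted xs (fun x => x) false with hs
  have hperm : s.Perm xs := PySem.List.sorted_perm xs _ _
  have hsne : s ≠ [] := fun h0 => hne (List.Perm.eq_nil (h0 ▸ hperm).symm)
  obtain ⟨m, t, hst⟩ := List.exists_cons_of_ne_nil hsne
  have hlen : s.length = xs.length := hperm.length_eq
  have hN : ((t.length : Int) + 1) = (xs.length : Int) := by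
    rw [← hlen, hst]; push_cast [List.length_cons]; ring
  have hget : (PySem.List.pyGet? s 0).getD 0 = m := by
    rw [hst, PySem.List.pyGet?_zero_cons, Option.getD_some]
  -- m is minimal in xs: the sorted list is pairwise ≤ and m is its head
  have hpw : s.Pairwise (fun a b => a ≤ b) := PySem.List.sorted_pairwise xs (fun x => x)
  have hmle : ∀ y ∈ xs, m ≤ y := by
    intro y hy
    have hy' : y ∈ m :: t := hst ▸ hperm.mem_iff.mpr hy
    rcases List.mem_cons.mp hy' with h | h
    · omega
    · exact (List.pairwise_cons.mp (hst ▸ hpw)).1 y h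
  have hmmem : m ∈ xs := hperm.mem_iff.mp (by rw [hst]; exact List.mem_cons_self)
  -- A's min is m
  obtain ⟨a, ha⟩ : ∃ a, PySem.List.min? xs (fun x => x) = some a := by
    cases h0 : PySem.List.min? xs (fun x => x) with
    | none => exact absurd ((PySem.List.min?_eq_none_iff _ _).mp h0) hne
    | some v => exact ⟨v, rfl⟩
  have ham : a = m :=
    le_antisymm (PySem.List.min?_isMin ha m hmmem) (hmle a (PySem.List.min?_mem ha))
  obtain ⟨M, hM⟩ : ∃ M, PySem.List.max? xs (fun x => x) = some M := by
    cases h0 : PySem.List.max? xs (fun x => x) with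
    | none => exact absurd ((PySem.List.max?_eq_none_iff _ _).mp h0) hne
    | some v => exact ⟨v, rfl⟩
  have hM1 : M ∈ xs := PySem.List.max?_mem hM
  have hM2 : ∀ y ∈ xs, y ≤ M := PySem.List.max?_isMax hM
  have hchain : pvChainFrom m s = true ↔ s = PySem.List.pyRange m (m + ((t.length : Int) + 1)) 1 := by
    have := chainFrom_eq_range s m
    rw [hst] at this ⊢
    simpa [List.length_cons] using this
  rw [hget, ha, hM, Option.getD_some, Option.getD_some, PySem.List.len_eq, PySem.List.len_eq, ham]
  by_cases hc : pvChainFrom m s = true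
  · have hrange : s = PySem.List.pyRange m (m + ((t.length : Int) + 1)) 1 := hchain.mp hc
    have hmemr : ∀ y ∈ xs, m ≤ y ∧ y < m + ((t.length : Int) + 1) := by
      intro y hy
      have hy' : y ∈ s := hperm.mem_iff.mpr hy
      exact (PySem.List.mem_pyRange_one).mp (hrange ▸ hy')
    have htop : m + (t.length : Int) ∈ xs := by
      have hmem : m + (t.length : Int) ∈ s := by
        rw [hrange, PySem.List.mem_pyRange_one]; omega
      exact hperm.mem_iff.mp hmem
    have hMv : M = m + (t.length : Int) := le_antisymm (by have := hmemr M hM1; omega) (hM2 _ htop)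
    have hnd : xs.Nodup := by
      rw [← hperm.nodup_iff, hrange]; exact PySem.List.nodup_pyRange_one _ _
    have hset : (PySem.Set.ofList xs).length = xs.length := (setlen_eq_iff_nodup xs).mpr hnd
    rw [if_pos, hc]
    simp only [Bool.and_eq_true, beq_iff_eq]
    exact ⟨by omega, by exact_mod_cast hset⟩
  · rw [if_neg, (Bool.not_eq_true _).mp hc]
    simp only [Bool.and_eq_true, beq_iff_eq, not_and]
    intro hspan hset
    have hnd : xs.Nodup := (setlen_eq_iff_nodup xs).mp (by exact_mod_cast hset)
    have hsub : xs ⊆ PySem.List.pyRange m (m + (xs.length : Int)) 1 := by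
      intro y hy
      rw [PySem.List.mem_pyRange_one]
      have h1 := hmle y hy
      have h2 := hM2 y hy
      omega
    have hsp : xs.Subperm (PySem.List.pyRange m (m + (xs.length : Int)) 1) :=
      List.subperm_of_subset hnd hsub
    have hlenr : (PySem.List.pyRange m (m + (xs.length : Int)) 1).length = xs.length := by
      rw [PySem.List.length_pyRange_one]; omega
    have hpr : (PySem.List.pyRange m (m + (xs.length : Int)) 1).Perm xs :=
      (hsp.perm_of_length_le (by omega)).symm
    have hseq : s = PySem.List.pyRange m (m + (xs.length : Int)) 1 :=
      PySem.List.sorted_eq_of_perm_of_pairwise_lt xs _ (fun x => x) hpr (PySem.List.pairwise_lt_pyRange_one _ _)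
    exact absurd (hchain.mpr (by rw [hseq, hN])) hc

-- ===== VERDICT (by name: the statement is the Claim_ definition above) =====
theorem are_merged_spec : Claim_equal_are_merged := by
  intro obj _ hpre
  unfold Spec_are_merged are_merged are_merged_alt
  have hne : obj.map (fun o => ((PySem.Dict.mk o).get? "address").getD 0) ≠ [] := by
    simpa using hpre.1
  simpa using core _ hne
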